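-- pv_equiv track=rewrite | github.com/FangYijia/deg-VC | vcdegequal.py | get_anf_representation
-- ===== SOURCE A (Python) =====
-- def get_anf_representation(truth_table: list[int], n: int) -> str:
--     """
--     Computes the Algebraic Normal Form (ANF) representation of a boolean function.
--
--     The representation is a polynomial over GF(2) using XOR (^) and AND (*).
--
--     Args:
--         truth_table: A list of 2^n integers (0 or 1).
--         n: The number of boolean variables.
--
--     Returns:
--         A string representing the function in ANF (e.g., "x1 ^ x2*x3 ^ 1").
--     """
--     coeffs = list(truth_table)
--     # Fast Walsh-Hadamard Transform to get ANF coefficients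
--     for i in range(n):
--         for j in range(len(coeffs)):
--             if (j >> i) & 1:
--                 coeffs[j] ^= coeffs[j ^ (1 << i)]
--
--     monomials = []
--     # i=0 is the constant term
--     if coeffs[0] == 1:
--         monomials.append("1")
--
--     # Iterate through other coefficients to build monomials
--     for i in range(1, len(coeffs)):
--         if coeffs[i] == 1:
--             term_vars = []
--             for k in range(n):
--                 if (i >> k) & 1:
--                     # Using 1-based indexing for variables x1, x2, ...
--                     term_vars.append(f"x{n-k}")
--             term_vars.reverse()
--             monomials.append("*".join(term_vars))
--
--     if not monomials:
--         return "0"  # Constant zero function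
--
--     return " ^ ".join(monomials)
-- ===== SOURCE B (Python) =====
-- def get_anf_representation(truth_table: list[int], n: int) -> str:
--     """ANF string of a boolean function, computing each ANF coefficient
--     directly via Moebius inversion: coefficient i is the XOR of the truth
--     table over all bit-subsets j of i."""
--     size = len(truth_table)
--     coeffs = []
--     for i in range(size):
--         acc = 0
--         for j in range(size):
--             if i | j == i:
--                 acc ^= truth_table[j]
--         coeffs.append(acc)
--
--     monomials = []
--     for i in range(size):
--         if coeffs[i] == 1:
--             if i == 0:
--                 monomials.append("1")
--             else:
--                 monomials.append("*".join(f"x{n-k}" for k in range(n - 1, -1, -1) if (i >> k) & 1))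
--
--     return " ^ ".join(monomials) if monomials else "0"
-- ===== Notes on version B (the rewrite author's own statement) =====
-- stated objective: alternative
-- what changed: Replaces A's in-place log-depth butterfly transform by computing each ANF coefficient independently as a XOR of truth-table entries over the bit-subsets of its index, and builds each monomial in one descending-k pass instead of an ascending pass followed by reverse; Pre_ restricts to the function's natural domain (nonempty truth table with at most 2^n entries, n >= 0), since outside it the declared variable count n contradicts the table size and neither output is a specified ANF.
-- outside the precondition, e.g. on get_anf_representation([0, 1, 1, 1], 1): A returns 'x1 ^ ', B returns 'x1 ^  ^ x1'; on get_anf_representation([1, 0], -3): A returns '1', B returns '1 ^ '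
import Mathlib
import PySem

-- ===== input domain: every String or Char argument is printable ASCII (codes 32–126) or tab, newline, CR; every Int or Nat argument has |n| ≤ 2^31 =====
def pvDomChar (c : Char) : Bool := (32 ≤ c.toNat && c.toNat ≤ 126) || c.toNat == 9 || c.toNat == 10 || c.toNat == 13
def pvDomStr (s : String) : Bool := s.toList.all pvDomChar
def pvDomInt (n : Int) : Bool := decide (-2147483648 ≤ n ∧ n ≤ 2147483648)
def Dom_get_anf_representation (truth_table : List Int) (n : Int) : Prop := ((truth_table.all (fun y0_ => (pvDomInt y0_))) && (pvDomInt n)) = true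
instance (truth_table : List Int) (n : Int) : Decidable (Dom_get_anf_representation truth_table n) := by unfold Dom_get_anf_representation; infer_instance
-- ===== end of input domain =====

-- B replaces A's in-place log-depth butterfly transform by computing each ANF
-- coefficient independently as a XOR of truth-table entries over the bit-subsets
-- of its index (Möbius inversion), and builds each monomial in one descending
-- pass without reverse; objective: alternative (same result on the natural
-- domain, genuinely different algorithm, not faster).

-- ===== PORT A =====
-- literal transliteration of A; the two inner reads coeffs[j], coeffs[j ^ (1 << i)]
-- are always in range in Python (the second index is smaller than j), so pyGetD's
-- default is never the value used; coeffs[0] raises IndexError on an empty list,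
-- which Pre_ excludes.
def pvAtransform (truth_table : List Int) (n : Int) : List Int :=
  (PySem.List.pyRange 0 n 1).foldl
    (fun (cs : List Int) (i : Int) =>
      (PySem.List.pyRange 0 (cs.length : Int) 1).foldl (fun (cs' : List Int) (j : Int) =>
        if PySem.Int.band (j >>> i.toNat) 1 == 1 then
          PySem.List.pySetD cs' j (PySem.Int.bxor (PySem.List.pyGetD cs' j 0)
            (PySem.List.pyGetD cs' (PySem.Int.bxor j ((1:Int) <<< i.toNat)) 0))
        else cs') cs) truth_table

def pvAmonomials (coeffs : List Int) (n : Int) : List String :=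
  (PySem.List.pyRange 1 (coeffs.length : Int) 1).foldl (fun ms i =>
    if PySem.List.pyGetD coeffs i 0 == 1 then
      ms ++ [PySem.Str.join "*"
        (((PySem.List.pyRange 0 n 1).foldl (fun tv k =>
          if PySem.Int.band (i >>> k.toNat) 1 == 1 then tv ++ ["x" ++ PySem.Int.toStr (n - k)] else tv) []).reverse)]
    else ms) (if PySem.List.pyGetD coeffs 0 0 == 1 then ["1"] else [])

def get_anf_representation (truth_table : List Int) (n : Int) : String :=
  if pvAmonomials (pvAtransform truth_table n) n == [] then "0"
  else PySem.Str.join " ^ " (pvAmonomials (pvAtransform truth_table n) n)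

-- ===== PORT B =====
def pvBcoeffs (truth_table : List Int) : List Int :=
  (PySem.List.pyRange 0 (truth_table.length : Int) 1).foldl (fun cs i =>
    cs ++ [(PySem.List.pyRange 0 (truth_table.length : Int) 1).foldl (fun acc j =>
      if PySem.Int.bor i j == i then
        PySem.Int.bxor acc (PySem.List.pyGetD truth_table j 0)
      else acc) 0]) []

def pvBmonomials (coeffs : List Int) (size : Int) (n : Int) : List String :=
  (PySem.List.pyRange 0 size 1).foldl (fun ms i =>
    if PySem.List.pyGetD coeffs i 0 == 1 then
      if i == 0 then ms ++ ["1"]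
      else ms ++ [PySem.Str.join "*"
        (((PySem.List.pyRange (n-1) (-1) (-1)).filter
            (fun k => PySem.Int.band (i >>> k.toNat) 1 == 1)).map
          (fun k => "x" ++ PySem.Int.toStr (n - k)))]
    else ms) []

def get_anf_representation_alt (truth_table : List Int) (n : Int) : String :=
  if pvBmonomials (pvBcoeffs truth_table) (truth_table.length : Int) n == [] then "0"
  else PySem.Str.join " ^ " (pvBmonomials (pvBcoeffs truth_table) (truth_table.length : Int) n)

-- ===== PRECONDITION & SPEC =====
-- Pre_ restricts to the function's natural domain (A's docstring: a truth table of
-- 2^n entries, n boolean variables): a nonempty table with at most 2^n entries and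
-- n ≥ 0; outside it the declared variable count n contradicts the table size and
-- neither program's output is a specified ANF (the empty table makes A raise).
-- '(len-1) >>> n.toNat = 0' is 'truth_table.length ≤ 2^n' for a nonempty table.
def Pre_get_anf_representation (truth_table : List Int) (n : Int) : Prop :=
  truth_table ≠ [] ∧ 0 ≤ n ∧ (truth_table.length - 1) >>> n.toNat = 0
instance (truth_table : List Int) (n : Int) : Decidable (Pre_get_anf_representation truth_table n) := by unfold Pre_get_anf_representation; infer_instance
def pvWitness_get_anf_representation : List Int × Int := ([1, 0, 1, 1], 2)

def Spec_get_anf_representation (truth_table : List Int) (n : Int) (out : String) : Prop := out = get_anf_representation_alt truth_table n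
instance (truth_table : List Int) (n : Int) (out : String) : Decidable (Spec_get_anf_representation truth_table n out) := by unfold Spec_get_anf_representation; infer_instance

-- ===== CLAIM (what is proved, stated in full; the proofs are below) =====
def Claim_equal_get_anf_representation : Prop := ∀ (truth_table : List Int) (n : Int), Dom_get_anf_representation truth_table n → Pre_get_anf_representation truth_table n → Spec_get_anf_representation truth_table n (get_anf_representation truth_table n)

-- ===== LEMMAS AND PROOFS =====

-- ---- Python XOR on Int: sign/magnitude representation and associativity ----
def pvDec (s : Bool) (m : Nat) : Int := if s then -(m : Int) - 1 else (m : Int)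

theorem pvDec_surj (a : Int) : ∃ s m, a = pvDec s m := by
  by_cases h : 0 ≤ a
  · exact ⟨false, a.toNat, by simp [pvDec]; omega⟩
  · exact ⟨true, (-a - 1).toNat, by simp [pvDec]; omega⟩

theorem bxor_pvDec (s t : Bool) (m k : Nat) :
    PySem.Int.bxor (pvDec s m) (pvDec t k) = pvDec (s ^^ t) (m ^^^ k) := by
  have e1 : ∀ a : Nat, ((a:Int)).toNat = a := fun a => by omega
  have e2 : ∀ a : Nat, (-(-(a:Int)-1)-1).toNat = a := fun a => by omega
  cases s <;> cases t
  · show PySem.Int.bxor (m:Int) (k:Int) = ((m ^^^ k : Nat) : Int)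
    exact PySem.Int.bxor_natCast m k
  · show PySem.Int.bxor (m:Int) (-(k:Int)-1) = -((m ^^^ k : Nat):Int)-1
    simp only [PySem.Int.bxor]
    rw [if_pos (by positivity), if_neg (by omega), e1, e2]
  · show PySem.Int.bxor (-(m:Int)-1) (k:Int) = -((m ^^^ k : Nat):Int)-1
    simp only [PySem.Int.bxor]
    rw [if_neg (by omega), if_pos (by positivity), e2, e1]
  · show PySem.Int.bxor (-(m:Int)-1) (-(k:Int)-1) = ((m ^^^ k : Nat):Int)
    simp only [PySem.Int.bxor]
    rw [if_neg (by omega), if_neg (by omega), e2, e2]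

theorem bxor_assoc' (a b c : Int) :
    PySem.Int.bxor (PySem.Int.bxor a b) c = PySem.Int.bxor a (PySem.Int.bxor b c) := by
  obtain ⟨s, m, rfl⟩ := pvDec_surj a
  obtain ⟨t, k, rfl⟩ := pvDec_surj b
  obtain ⟨u, l, rfl⟩ := pvDec_surj c
  rw [bxor_pvDec, bxor_pvDec, bxor_pvDec, bxor_pvDec, Bool.xor_assoc, Nat.xor_assoc]

theorem zero_bxor (a : Int) : PySem.Int.bxor 0 a = a := by
  rw [PySem.Int.bxor_comm]; exact PySem.Int.bxor_zero a

theorem bxor_right_comm (a b c : Int) :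
    PySem.Int.bxor (PySem.Int.bxor a b) c = PySem.Int.bxor (PySem.Int.bxor a c) b := by
  rw [bxor_assoc', bxor_assoc', PySem.Int.bxor_comm b c]

-- ---- bit-level facts ----
theorem sr_zero_iff (x m : Nat) :
    x >>> m = 0 ↔ ∀ k, m ≤ k → x.testBit k = false := by
  constructor
  · intro h k hk
    have h2 := Nat.testBit_shiftRight (i := m) (j := k - m) x
    rw [h, Nat.zero_testBit, show m + (k - m) = k by omega] at h2
    exact h2.symm
  · intro h
    refine Nat.zero_of_testBit_eq_false (fun i => ?_)
    rw [Nat.testBit_shiftRight]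
    exact h (m + i) (by omega)

theorem or_eq_left_iff (j x : Nat) :
    j ||| x = j ↔ ∀ k, x.testBit k = true → j.testBit k = true := by
  constructor
  · intro h k hk
    have := congrArg (fun z => z.testBit k) h
    simp only [Nat.testBit_or, hk, Bool.or_true] at this
    exact this.symm
  · intro h
    refine Nat.eq_of_testBit_eq (fun k => ?_)
    rw [Nat.testBit_or]
    by_cases hx : x.testBit k = true
    · simp [hx, h k hx]
    · simp [Bool.eq_false_iff.mpr hx]

-- predicate: x contributes to coefficient j after m butterfly passes
def pvP (m j x : Nat) : Bool := (j ||| x == j) && ((j ^^^ x) >>> m == 0)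

def pvG (tt : List Int) (m j : Nat) : Int :=
  (List.range tt.length).foldl
    (fun a x => if pvP m j x then PySem.Int.bxor a (tt.getD x 0) else a) 0

theorem pvP_true_iff (m j x : Nat) :
    pvP m j x = true ↔ (j ||| x = j ∧ (∀ k, m ≤ k → (j ^^^ x).testBit k = false)) := by
  rw [pvP, Bool.and_eq_true, beq_iff_eq, beq_iff_eq, sr_zero_iff]

theorem pvP_zero (j x : Nat) : pvP 0 j x = (x == j) := by
  by_cases h : x = j
  · subst h; simp [pvP]
  · have h1 : (x == j) = false := by simp [h]
    have h2 : pvP 0 j x = false := by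
      rcases hc : pvP 0 j x
      · rfl
      · exfalso
        obtain ⟨_, hhi⟩ := (pvP_true_iff 0 j x).mp hc
        have : j ^^^ x = 0 := Nat.zero_of_testBit_eq_false (fun i => hhi i (by omega))
        exact h (Nat.xor_eq_zero_iff.mp this).symm
    rw [h1, h2]

theorem testBit_xor_two_pow (j m k : Nat) :
    (j ^^^ 2 ^ m).testBit k = (j.testBit k ^^ decide (m = k)) := by
  rw [Nat.testBit_xor, Nat.testBit_two_pow]

theorem testBit_xor_two_pow_ne (j m k : Nat) (h : m ≠ k) :
    (j ^^^ 2 ^ m).testBit k = j.testBit k := by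
  rw [testBit_xor_two_pow]; simp [h]

theorem pvP_succ_bit_false (m j x : Nat) (hb : j.testBit m = false) :
    pvP (m + 1) j x = pvP m j x := by
  rcases hc : pvP m j x
  · rcases hc1 : pvP (m + 1) j x
    · rfl
    · exfalso
      obtain ⟨hsub, hhi⟩ := (pvP_true_iff _ _ _).mp hc1
      have hxm : x.testBit m = false := by
        rcases hx : x.testBit m
        · rfl
        · have := (or_eq_left_iff j x).mp hsub m hx
          rw [this] at hb; cases hb
      have : pvP m j x = true := by
        rw [pvP_true_iff]
        refine ⟨hsub, fun k hk => ?_⟩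
        by_cases hkm : k = m
        · subst hkm; rw [Nat.testBit_xor, hb, hxm]; rfl
        · exact hhi k (by omega)
      rw [this] at hc; cases hc
  · obtain ⟨hsub, hhi⟩ := (pvP_true_iff _ _ _).mp hc
    rw [pvP_true_iff]
    exact ⟨hsub, fun k hk => hhi k (by omega)⟩

theorem pvP_succ_of_left (m j x : Nat) (h : pvP m j x = true) : pvP (m + 1) j x = true := by
  obtain ⟨hsub, hhi⟩ := (pvP_true_iff _ _ _).mp h
  rw [pvP_true_iff]
  exact ⟨hsub, fun k hk => hhi k (by omega)⟩

theorem pvP_succ_of_right (m j x : Nat) (hb : j.testBit m = true)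
    (h : pvP m (j ^^^ 2 ^ m) x = true) : pvP (m + 1) j x = true := by
  obtain ⟨hsub, hhi⟩ := (pvP_true_iff _ _ _).mp h
  have hsub' := (or_eq_left_iff _ _).mp hsub
  rw [pvP_true_iff]
  constructor
  · rw [or_eq_left_iff]
    intro k hk
    by_cases hmk : m = k
    · exact hmk ▸ hb
    · have := hsub' k hk
      rwa [testBit_xor_two_pow_ne j m k hmk] at this
  · intro k hk
    have h2 := hhi k (by omega)
    rw [Nat.testBit_xor, testBit_xor_two_pow_ne j m k (by omega)] at h2
    rw [Nat.testBit_xor]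
    exact h2

theorem pvP_succ_cases (m j x : Nat) (hb : j.testBit m = true)
    (h : pvP (m + 1) j x = true) :
    (x.testBit m = true → pvP m j x = true ∧ pvP m (j ^^^ 2 ^ m) x = false) ∧
    (x.testBit m = false → pvP m j x = false ∧ pvP m (j ^^^ 2 ^ m) x = true) := by
  obtain ⟨hsub, hhi⟩ := (pvP_true_iff _ _ _).mp h
  have hsub' := (or_eq_left_iff _ _).mp hsub
  constructor
  · intro hxm
    constructor
    · rw [pvP_true_iff]
      refine ⟨hsub, fun k hk => ?_⟩
      by_cases hkm : k = m
      · subst hkm; rw [Nat.testBit_xor, hb, hxm]; rfl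
      · exact hhi k (by omega)
    · rcases hc : pvP m (j ^^^ 2 ^ m) x
      · rfl
      · exfalso
        obtain ⟨hs2, _⟩ := (pvP_true_iff _ _ _).mp hc
        have := (or_eq_left_iff _ _).mp hs2 m hxm
        rw [testBit_xor_two_pow, hb] at this
        simpa using this
  · intro hxm
    constructor
    · rcases hc : pvP m j x
      · rfl
      · exfalso
        obtain ⟨_, hh2⟩ := (pvP_true_iff _ _ _).mp hc
        have := hh2 m (by omega)
        rw [Nat.testBit_xor, hb, hxm] at this
        simpa using this
    · rw [pvP_true_iff]
      constructor
      · rw [or_eq_left_iff]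
        intro k hk
        by_cases hmk : m = k
        · subst hmk; rw [hk] at hxm; cases hxm
        · rw [testBit_xor_two_pow_ne j m k hmk]
          exact hsub' k hk
      · intro k hk
        by_cases hkm : k = m
        · subst hkm
          rw [Nat.testBit_xor, testBit_xor_two_pow, hb, hxm]
          simp
        · have h2 := hhi k (by omega)
          rw [Nat.testBit_xor] at h2
          rw [Nat.testBit_xor, testBit_xor_two_pow_ne j m k (by omega)]
          exact h2

theorem foldl_id {α β : Type} (l : List α) (a : β) : l.foldl (fun a _ => a) a = a := by
  induction l generalizing a with
  | nil => rfl
  | cons x xs ih => exact ih a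

theorem fold_single (g : Nat → Int) (L j : Nat) (a : Int) (hj : j < L) :
    (List.range L).foldl (fun a x => if x == j then PySem.Int.bxor a (g x) else a) a
      = PySem.Int.bxor a (g j) := by
  induction L generalizing a with
  | zero => omega
  | succ L ih =>
    rw [List.range_succ, List.foldl_append]
    by_cases h : j < L
    · rw [ih _ h]
      simp only [List.foldl_cons, List.foldl_nil]
      have : (L == j) = false := by simp; omega
      rw [this]; rfl
    · have hj' : j = L := by omega
      subst hj'
      rw [PySem.List.foldl_congr_mem _ _ (fun a _ => a) a
        (fun acc x hx => by
          have hxj : x < j := List.mem_range.mp hx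
          have : (x == j) = false := by simp; omega
          simp [this]), foldl_id]
      simp

theorem fold_split (tt : List Int) (m j : Nat) (hb : j.testBit m = true)
    (l : List Nat) (a b : Int) :
    l.foldl (fun acc x => if pvP (m + 1) j x then PySem.Int.bxor acc (tt.getD x 0) else acc)
        (PySem.Int.bxor a b)
      = PySem.Int.bxor
          (l.foldl (fun acc x => if pvP m j x then PySem.Int.bxor acc (tt.getD x 0) else acc) a)
          (l.foldl (fun acc x => if pvP m (j ^^^ 2 ^ m) x then PySem.Int.bxor acc (tt.getD x 0) else acc) b) := by
  induction l generalizing a b with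
  | nil => rfl
  | cons x xs ih =>
    simp only [List.foldl_cons]
    by_cases h : pvP (m + 1) j x = true
    · rcases hx : x.testBit m
      · obtain ⟨h1, h2⟩ := (pvP_succ_cases m j x hb h).2 hx
        rw [if_pos h, if_neg (by simp [h1]), if_pos h2, bxor_assoc']
        exact ih a (PySem.Int.bxor b (tt.getD x 0))
      · obtain ⟨h1, h2⟩ := (pvP_succ_cases m j x hb h).1 hx
        rw [if_pos h, if_pos h1, if_neg (by simp [h2]), bxor_right_comm]
        exact ih (PySem.Int.bxor a (tt.getD x 0)) b
    · have h1 : pvP m j x = false := by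
        rcases hc : pvP m j x
        · rfl
        · rw [pvP_succ_of_left m j x hc] at h; cases h rfl
      have h2 : pvP m (j ^^^ 2 ^ m) x = false := by
        rcases hc : pvP m (j ^^^ 2 ^ m) x
        · rfl
        · rw [pvP_succ_of_right m j x hb hc] at h; cases h rfl
      rw [if_neg h, if_neg (by simp [h1]), if_neg (by simp [h2])]
      exact ih a b

theorem pvG_zero (tt : List Int) (j : Nat) (hj : j < tt.length) :
    pvG tt 0 j = tt.getD j 0 := by
  unfold pvG
  rw [PySem.List.foldl_congr_mem _ _
    (fun a x => if x == j then PySem.Int.bxor a (tt.getD x 0) else a) 0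
    (fun acc x _ => by rw [pvP_zero])]
  rw [fold_single _ _ _ _ hj, zero_bxor]

theorem pvG_succ (tt : List Int) (m j : Nat) :
    pvG tt (m + 1) j =
      if j.testBit m then PySem.Int.bxor (pvG tt m j) (pvG tt m (j ^^^ 2 ^ m))
      else pvG tt m j := by
  unfold pvG
  rcases hb : j.testBit m
  · rw [if_neg Bool.false_ne_true]
    exact PySem.List.foldl_congr_mem _ _ _ 0
      (fun acc x _ => by rw [pvP_succ_bit_false m j x hb])
  · rw [if_pos rfl]
    have h := fold_split tt m j hb (List.range tt.length) 0 0
    rw [show PySem.Int.bxor 0 0 = 0 from PySem.Int.bxor_zero 0] at h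
    exact h

-- ---- the butterfly pass acts pointwise ----
theorem set_map_range {f : Nat → Int} {L t : Nat} (v : Int) :
    ((List.range L).map f).set t v = (List.range L).map (fun j => if j = t then v else f j) := by
  apply List.ext_getElem
  · simp
  · intro k h1 h2
    simp only [List.length_set, List.length_map, List.length_range] at h1
    rw [List.getElem_set]
    by_cases h : t = k
    · subst h; simp
    · have h2 : ¬ k = t := fun hc => h hc.symm
      simp [h, h2]

theorem getD_map_range' (f : Nat → Int) (L j : Nat) (hj : j < L) :
    ((List.range L).map f).getD j 0 = f j := by
  simp [List.getD_eq_getElem?_getD, hj]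

theorem band_one_testBit (x i : Nat) : ((x >>> i) &&& 1 == 1) = x.testBit i := by
  rw [Nat.testBit, Nat.and_one_is_mod, Nat.one_and_eq_mod_two]
  rcases h : (x >>> i) % 2 with _ | k
  · simp
  · have h2 : (x >>> i) % 2 < 2 := Nat.mod_lt _ (by omega)
    rw [h] at h2
    have : k = 0 := by omega
    subst this; simp

theorem inner_pass (i : Nat) (cs : List Int) (t : Nat) (ht : t ≤ cs.length) :
    ((List.range t).map (fun (k : Nat) => (k : Int))).foldl
      (fun (cs' : List Int) (j : Int) =>
        if PySem.Int.band (j >>> i) 1 == 1 then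
          PySem.List.pySetD cs' j (PySem.Int.bxor (PySem.List.pyGetD cs' j 0)
            (PySem.List.pyGetD cs' (PySem.Int.bxor j ((1:Int) <<< i)) 0))
        else cs') cs
    = (List.range cs.length).map (fun j =>
        if j < t ∧ j.testBit i then
          PySem.Int.bxor (cs.getD j 0) (cs.getD (j ^^^ 2 ^ i) 0)
        else cs.getD j 0) := by
  induction t with
  | zero =>
    simp only [List.range_zero, List.map_nil, List.foldl_nil]
    apply List.ext_getElem
    · simp
    · intro k h1 h2
      rw [List.getElem_map, List.getElem_range]
      simp only [Nat.not_lt_zero, false_and, if_false]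
      simp [List.getD_eq_getElem?_getD, h1]
  | succ t ih =>
    have ht' : t ≤ cs.length := by omega
    rw [List.range_succ, List.map_append, List.foldl_append, ih ht']
    simp only [List.map_cons, List.map_nil, List.foldl_cons, List.foldl_nil]
    have hcast : ((t : Int) >>> i) = ((t >>> i : Nat) : Int) := rfl
    have hband : PySem.Int.band ((t : Int) >>> i) 1 = (((t >>> i) &&& 1 : Nat) : Int) := by
      rw [hcast, show (1 : Int) = ((1 : Nat) : Int) from rfl, PySem.Int.band_natCast]
    rcases hb : t.testBit i
    · -- bit i of t clear: no update; extend the prefix bound by map congruence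
      have hcond : (PySem.Int.band ((t : Int) >>> i) 1 == 1) = false := by
        rw [hband]
        rw [← band_one_testBit t i] at hb
        simp only [beq_eq_false_iff_ne] at hb ⊢
        intro hc
        exact hb (by exact_mod_cast hc)
      rw [hcond]
      simp only [Bool.false_eq_true, if_false]
      apply List.map_congr_left
      intro j hj
      by_cases hjt : j < t
      · simp [hjt, show j < t + 1 by omega]
      · by_cases hjt1 : j < t + 1
        · have : j = t := by omega
          subst this
          simp [hb]
        · simp [hjt, hjt1]
    · have hcond : (PySem.Int.band ((t : Int) >>> i) 1 == 1) = true := by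
        rw [hband]
        rw [← band_one_testBit t i] at hb
        simp only [beq_iff_eq] at hb ⊢
        exact_mod_cast hb
      rw [hcond]
      simp only [if_true]
      -- the two reads
      have ht2lt : t ^^^ 2 ^ i < t := by
        refine Nat.lt_of_testBit i ?_ hb (fun k hk => ?_)
        · rw [testBit_xor_two_pow, hb]; simp
        · rw [testBit_xor_two_pow]
          have : ¬ (i = k) := by omega
          simp [this]
      have hread1 : PySem.List.pyGetD ((List.range cs.length).map (fun j =>
          if j < t ∧ j.testBit i then PySem.Int.bxor (cs.getD j 0) (cs.getD (j ^^^ 2 ^ i) 0)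
          else cs.getD j 0)) (t : Int) 0 = cs.getD t 0 := by
        rw [PySem.List.pyGetD_natCast, getD_map_range' _ _ _ (by omega)]
        simp
      have hidx : PySem.Int.bxor (t : Int) ((1:Int) <<< i) = ((t ^^^ 2 ^ i : Nat) : Int) := by
        have h1 : ((1:Int) <<< i) = ((2 ^ i : Nat) : Int) := by
          simp [Int.shiftLeft_eq]
        rw [h1, PySem.Int.bxor_natCast]
      have hread2 : PySem.List.pyGetD ((List.range cs.length).map (fun j =>
          if j < t ∧ j.testBit i then PySem.Int.bxor (cs.getD j 0) (cs.getD (j ^^^ 2 ^ i) 0)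
          else cs.getD j 0)) (PySem.Int.bxor (t : Int) ((1:Int) <<< i)) 0 = cs.getD (t ^^^ 2 ^ i) 0 := by
        rw [hidx, PySem.List.pyGetD_natCast, getD_map_range' _ _ _ (by omega)]
        have hb2 : (t ^^^ 2 ^ i).testBit i = false := by
          rw [testBit_xor_two_pow, hb]; simp
        simp [hb2]
      rw [hread1, hread2, PySem.List.pySetD_natCast, set_map_range]
      apply List.map_congr_left
      intro j hj
      by_cases hjt : j = t
      · subst hjt
        simp [hb]
      · by_cases hjlt : j < t
        · simp [hjt, hjlt, show j < t + 1 by omega]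
        · simp [hjt, show ¬ (j < t + 1) by omega, hjlt]

-- ---- full transform = pointwise subset XOR ----
theorem trans_eq (tt : List Int) (m : Nat) :
    ((List.range m).map (fun (k : Nat) => (k : Int))).foldl
      (fun (cs : List Int) (i : Int) =>
        (PySem.List.pyRange 0 (cs.length : Int) 1).foldl (fun (cs' : List Int) (j : Int) =>
          if PySem.Int.band (j >>> i.toNat) 1 == 1 then
            PySem.List.pySetD cs' j (PySem.Int.bxor (PySem.List.pyGetD cs' j 0)
              (PySem.List.pyGetD cs' (PySem.Int.bxor j ((1:Int) <<< i.toNat)) 0))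
          else cs') cs) tt
    = (List.range tt.length).map (fun j => pvG tt m j) := by
  induction m with
  | zero =>
    simp only [List.range_zero, List.map_nil, List.foldl_nil]
    apply List.ext_getElem
    · simp
    · intro k h1 h2
      rw [List.getElem_map, List.getElem_range, pvG_zero tt k (by simpa using h1)]
      simp [List.getD_eq_getElem?_getD, h1]
  | succ m ih =>
    rw [List.range_succ, List.map_append, List.foldl_append, ih]
    simp only [List.map_cons, List.map_nil, List.foldl_cons, List.foldl_nil]
    set X := (List.range tt.length).map (fun j => pvG tt m j) with hX
    have hlen : X.length = tt.length := by simp [hX]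
    have htoNat : ((m : Int)).toNat = m := Int.toNat_natCast m
    rw [htoNat]
    rw [show (PySem.List.pyRange 0 (X.length : Int) 1) = (List.range X.length).map (fun (k : Nat) => (k : Int)) from
      PySem.List.pyRange_zero_natCast X.length]
    rw [inner_pass m X X.length (le_refl _)]
    apply List.ext_getElem
    · simp [hlen]
    · intro k h1 h2
      simp only [List.length_map, List.length_range, hlen] at h1 h2 ⊢
      rw [List.getElem_map, List.getElem_range, List.getElem_map, List.getElem_range]
      rw [pvG_succ]
      have hkX : X.getD k 0 = pvG tt m k := by
        rw [hX, getD_map_range' _ _ _ (by simpa [hlen] using h1)]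
      rcases hb : k.testBit m
      · simp [h1, hX]
      · have hk2 : k ^^^ 2 ^ m < k := by
          refine Nat.lt_of_testBit m ?_ hb (fun j hj => ?_)
          · rw [testBit_xor_two_pow, hb]; simp
          · rw [testBit_xor_two_pow]
            have : ¬ (m = j) := by omega
            simp [this]
        have hk2X : X.getD (k ^^^ 2 ^ m) 0 = pvG tt m (k ^^^ 2 ^ m) := by
          rw [hX, getD_map_range' _ _ _ (by omega)]
        have hlt2 : k ^^^ 2 ^ m < tt.length := by omega
        simp [h1, hX, hlt2]

-- ---- under Pre_, B's pure subset condition agrees with pvP ----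
theorem shift_zero_of_le (a b nN : Nat) (hab : a ≤ b) (hb : b >>> nN = 0) :
    a >>> nN = 0 := by
  rw [Nat.shiftRight_eq_div_pow] at *
  have hp : 0 < 2 ^ nN := Nat.two_pow_pos nN
  have hblt : b < 2 ^ nN := by
    by_contra hc
    have := Nat.div_le_div_right (c := 2 ^ nN) (Nat.le_of_not_lt hc)
    rw [Nat.div_self hp] at this
    omega
  exact Nat.div_eq_of_lt (by omega)

theorem subset_shift (nN i x : Nat) (hi : i >>> nN = 0) (h : i ||| x = i) :
    (i ^^^ x) >>> nN = 0 := by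
  rw [sr_zero_iff]
  intro k hk
  have hik : i.testBit k = false := (sr_zero_iff i nN).mp hi k hk
  have hxk : x.testBit k = false := by
    rcases hc : x.testBit k
    · rfl
    · have := (or_eq_left_iff i x).mp h k hc
      rw [this] at hik; cases hik
  rw [Nat.testBit_xor, hik, hxk]; rfl

-- ---- B's coefficients are the same pointwise subset XOR (under Pre_) ----
theorem alt_coeffs_eq (tt : List Int) (n : Int) (hpre : (tt.length - 1) >>> n.toNat = 0) :
    (PySem.List.pyRange 0 (tt.length : Int) 1).foldl (fun cs i =>
      cs ++ [(PySem.List.pyRange 0 (tt.length : Int) 1).foldl (fun acc j =>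
        if PySem.Int.bor i j == i then
          PySem.Int.bxor acc (PySem.List.pyGetD tt j 0)
        else acc) 0]) []
    = (List.range tt.length).map (fun j => pvG tt n.toNat j) := by
  rw [PySem.List.pyRange_zero_natCast tt.length, List.foldl_map,
    PySem.List.foldl_append_singleton_eq_map
      (fun iN : Nat => ((List.range tt.length).map (fun (k : Nat) => (k : Int))).foldl (fun acc j =>
        if PySem.Int.bor (iN : Int) j == (iN : Int) then
          PySem.Int.bxor acc (PySem.List.pyGetD tt j 0)
        else acc) 0)]
  simp only [List.nil_append]
  apply List.map_congr_left
  intro i hi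
  have hiL : i < tt.length := List.mem_range.mp hi
  have hiS : i >>> n.toNat = 0 := shift_zero_of_le i (tt.length - 1) n.toNat (by omega) hpre
  rw [List.foldl_map]
  unfold pvG
  apply PySem.List.foldl_congr_mem
  intro acc x _
  have hcond : (PySem.Int.bor (i : Int) (x : Int) == (i : Int)) = pvP n.toNat i x := by
    rw [PySem.Int.bor_natCast]
    by_cases h : i ||| x = i
    · have h2 : (i ^^^ x) >>> n.toNat = 0 := subset_shift n.toNat i x hiS h
      simp [pvP, h, h2]
    · have hne : ¬ ((i ||| x : Nat) : Int) = (i : Int) := by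
        intro hc; exact h (by exact_mod_cast hc)
      have hL : (((i ||| x : Nat) : Int) == (i : Int)) = false := by
        simp only [beq_eq_false_iff_ne]; exact hne
      have hR : ((i ||| x : Nat) == i) = false := by
        simp only [beq_eq_false_iff_ne]; exact h
      rw [hL, pvP, hR, Bool.false_and]
  rw [hcond, PySem.List.pyGetD_natCast]

-- ---- string phase ----
theorem pyRange_rev (n : Int) :
    PySem.List.pyRange (n - 1) (-1) (-1) = (PySem.List.pyRange 0 n 1).reverse := by
  rw [PySem.List.pyRange_neg_one_eq_reverse]
  norm_num

theorem term_eq (i n : Int) :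
    ((PySem.List.pyRange (n-1) (-1) (-1)).filter
        (fun k => PySem.Int.band (i >>> k.toNat) 1 == 1)).map
      (fun k => "x" ++ PySem.Int.toStr (n - k))
    = ((PySem.List.pyRange 0 n 1).foldl (fun tv k =>
        if PySem.Int.band (i >>> k.toNat) 1 == 1 then tv ++ ["x" ++ PySem.Int.toStr (n - k)] else tv) []).reverse := by
  rw [PySem.List.foldl_append_if (fun k => PySem.Int.band (i >>> k.toNat) 1 == 1)
    (fun k => "x" ++ PySem.Int.toStr (n - k)) (PySem.List.pyRange 0 n 1) []]
  rw [List.nil_append, ← List.map_reverse, ← List.filter_reverse, ← pyRange_rev]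

theorem monomials_eq (cs : List Int) (n : Int) (L : Nat) (hL : cs.length = L) :
    (PySem.List.pyRange 0 (L:Int) 1).foldl (fun ms i =>
      if PySem.List.pyGetD cs i 0 == 1 then
        if i == 0 then ms ++ ["1"]
        else ms ++ [PySem.Str.join "*"
          (((PySem.List.pyRange (n-1) (-1) (-1)).filter
              (fun k => PySem.Int.band (i >>> k.toNat) 1 == 1)).map
            (fun k => "x" ++ PySem.Int.toStr (n - k)))]
      else ms) []
    = (PySem.List.pyRange 1 (L:Int) 1).foldl (fun ms i =>
        if PySem.List.pyGetD cs i 0 == 1 then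
          ms ++ [PySem.Str.join "*"
            (((PySem.List.pyRange 0 n 1).foldl (fun tv k =>
              if PySem.Int.band (i >>> k.toNat) 1 == 1 then tv ++ ["x" ++ PySem.Int.toStr (n - k)] else tv) []).reverse)]
        else ms) (if PySem.List.pyGetD cs 0 0 == 1 then ["1"] else []) := by
  rcases Nat.eq_zero_or_pos L with h0 | hpos
  · subst h0
    have hnil : cs = [] := List.eq_nil_of_length_eq_zero hL
    subst hnil
    rw [show ((0:Nat):Int) = 0 from rfl]
    rw [show PySem.List.pyRange 0 0 1 = [] from rfl, show PySem.List.pyRange 1 0 1 = [] from rfl]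
    rw [List.foldl_nil, List.foldl_nil]
    rw [show (PySem.List.pyGetD ([] : List Int) 0 0 == 1) = false from rfl]
    rw [if_neg Bool.false_ne_true]
  · rw [PySem.List.pyRange_one_cons (show (0:Int) < (L:Int) by exact_mod_cast hpos)]
    rw [List.foldl_cons, zero_add]
    have hstep : (if PySem.List.pyGetD cs 0 0 == 1 then
        if (0:Int) == 0 then ([] : List String) ++ ["1"]
        else [] ++ [PySem.Str.join "*"
          (((PySem.List.pyRange (n-1) (-1) (-1)).filter
              (fun k => PySem.Int.band ((0:Int) >>> k.toNat) 1 == 1)).map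
            (fun k => "x" ++ PySem.Int.toStr (n - k)))]
      else ([] : List String)) = (if PySem.List.pyGetD cs 0 0 == 1 then ["1"] else []) := by
      rcases hc : PySem.List.pyGetD cs 0 0 == 1
      · rw [if_neg Bool.false_ne_true, if_neg Bool.false_ne_true]
      · rw [if_pos rfl, if_pos (show (((0:Int)) == 0) = true from rfl), List.nil_append, if_pos rfl]
    rw [hstep]
    apply PySem.List.foldl_congr_mem
    intro ms i hi
    have h1 : (1:Int) ≤ i := (PySem.List.mem_pyRange_one.mp hi).1
    have hi0 : (i == (0:Int)) = false := by
      simp only [beq_eq_false_iff_ne]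
      omega
    rw [hi0]
    rcases hc : PySem.List.pyGetD cs i 0 == 1
    · rw [if_neg Bool.false_ne_true, if_neg Bool.false_ne_true]
    · rw [if_pos rfl, if_pos rfl, if_neg Bool.false_ne_true, term_eq i n]

-- the whole coefficient transform of port A, phrased on the pyRange it uses
theorem trans_eq' (tt : List Int) (n : Int) :
    (PySem.List.pyRange 0 n 1).foldl
      (fun (cs : List Int) (i : Int) =>
        (PySem.List.pyRange 0 (cs.length : Int) 1).foldl (fun (cs' : List Int) (j : Int) =>
          if PySem.Int.band (j >>> i.toNat) 1 == 1 then
            PySem.List.pySetD cs' j (PySem.Int.bxor (PySem.List.pyGetD cs' j 0)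
              (PySem.List.pyGetD cs' (PySem.Int.bxor j ((1:Int) <<< i.toNat)) 0))
          else cs') cs) tt
    = (List.range tt.length).map (fun j => pvG tt n.toNat j) := by
  rw [show PySem.List.pyRange 0 n 1 = (List.range n.toNat).map (fun (k : Nat) => (k : Int)) by
    rw [PySem.List.pyRange_one]; simp]
  exact trans_eq tt n.toNat

theorem pvAtransform_eq (tt : List Int) (n : Int) :
    pvAtransform tt n = (List.range tt.length).map (fun j => pvG tt n.toNat j) := by
  unfold pvAtransform
  exact trans_eq' tt n

theorem pvBcoeffs_eq (tt : List Int) (n : Int) (hpre : (tt.length - 1) >>> n.toNat = 0) :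
    pvBcoeffs tt = (List.range tt.length).map (fun j => pvG tt n.toNat j) := by
  unfold pvBcoeffs
  exact alt_coeffs_eq tt n hpre

theorem pvMonomials_eq (tt : List Int) (n : Int) :
    pvBmonomials ((List.range tt.length).map (fun j => pvG tt n.toNat j)) (tt.length : Int) n
      = pvAmonomials ((List.range tt.length).map (fun j => pvG tt n.toNat j)) n := by
  unfold pvBmonomials pvAmonomials
  simp only [List.length_map, List.length_range]
  exact monomials_eq _ n tt.length (by simp)

-- ===== VERDICT (by name: the statement is the Claim_ definition above) =====
theorem get_anf_representation_spec : Claim_equal_get_anf_representation := by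
  intro tt n _ hpre
  obtain ⟨-, -, hsh⟩ := hpre
  unfold Spec_get_anf_representation get_anf_representation get_anf_representation_alt
  rw [pvAtransform_eq, pvBcoeffs_eq tt n hsh, pvMonomials_eq]
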